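-- pv_equiv track=rewrite | github.com/mmanzanomo/pytorch-CNN-pneumonia-detection | src/visualization/visualize.py | count_labels
-- ===== SOURCE A (Python) =====
-- def count_labels(labels):
--     """
--     Count the occurrences of different labels in a given list.
--
--     Args:
--         labels (List[str]): List of labels.
--
--     Returns:
--         Tuple[int, int, int, int]: Tuple containing counts for 'NORMAL', 'PNEUMONIA_BACTERIA', 'PNEUMONIA_VIRUS', and total labels.
--
--     Example:
--         normal_count, bacteria_count, virus_count, total_count = count_labels(my_labels)
--     """
--     normal = 0
--     bacteria = 0
--     virus = 0
--     total = 0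
--
--     for label in labels:
--         if label == 'NORMAL':
--             normal += 1
--         elif label == 'PNEUMONIA_BACTERIA':
--             bacteria += 1
--         elif label == 'PNEUMONIA_VIRUS':
--             virus += 1
--         total += 1
--
--     return normal, bacteria, virus, total
-- ===== SOURCE B (Python) =====
-- def count_labels(labels):
--     return (labels.count('NORMAL'),
--             labels.count('PNEUMONIA_BACTERIA'),
--             labels.count('PNEUMONIA_VIRUS'),
--             len(labels))
-- ===== Notes on version B (the rewrite author's own statement) =====
-- stated objective: simpler
-- what changed: Replaces the single branch-per-element accumulator loop with four independent staged passes: one list.count per named label and len(labels) for the total (the unconditional total increment is exactly the length).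
import Mathlib
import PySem

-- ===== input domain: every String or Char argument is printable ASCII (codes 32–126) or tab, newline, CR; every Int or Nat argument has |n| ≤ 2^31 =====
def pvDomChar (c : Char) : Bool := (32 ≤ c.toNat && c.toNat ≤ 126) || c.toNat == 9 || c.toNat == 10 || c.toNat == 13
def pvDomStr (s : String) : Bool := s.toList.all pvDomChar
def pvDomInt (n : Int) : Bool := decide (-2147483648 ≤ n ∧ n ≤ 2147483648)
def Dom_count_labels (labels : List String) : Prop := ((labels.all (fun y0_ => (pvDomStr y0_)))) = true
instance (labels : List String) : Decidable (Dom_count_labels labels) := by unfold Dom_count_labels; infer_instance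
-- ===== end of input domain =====

-- B replaces A's branch-per-element accumulator loop with four independent staged passes:
-- list.count per named label and len(labels) for the total (objective: simpler; same value everywhere).

-- ===== PORT A =====
def count_labels_step (st : Int × Int × Int × Int) (label : String) : Int × Int × Int × Int :=
  let (normal, bacteria, virus, total) := st
  if label == "NORMAL" then (normal + 1, bacteria, virus, total + 1)
  else if label == "PNEUMONIA_BACTERIA" then (normal, bacteria + 1, virus, total + 1)
  else if label == "PNEUMONIA_VIRUS" then (normal, bacteria, virus + 1, total + 1)
  else (normal, bacteria, virus, total + 1)

def count_labels (labels : List String) : Int × Int × Int × Int :=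
  labels.foldl count_labels_step (0, 0, 0, 0)

-- ===== PORT B =====
def count_labels_alt (labels : List String) : Int × Int × Int × Int :=
  ((PySem.List.count labels "NORMAL" : Int),
   (PySem.List.count labels "PNEUMONIA_BACTERIA" : Int),
   (PySem.List.count labels "PNEUMONIA_VIRUS" : Int),
   (labels.length : Int))

-- ===== PRECONDITION & SPEC =====
def Spec_count_labels (labels : List String) (out : Int × Int × Int × Int) : Prop := out = count_labels_alt labels
instance (labels : List String) (out : Int × Int × Int × Int) : Decidable (Spec_count_labels labels out) := by unfold Spec_count_labels; infer_instance

-- ===== CLAIM (what is proved, stated in full; the proofs are below) =====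
def Claim_equal_count_labels : Prop := ∀ (labels : List String), Dom_count_labels labels → Spec_count_labels labels (count_labels labels)

-- ===== LEMMAS AND PROOFS =====

lemma count_labels_fold (labels : List String) (n b v t : Int) :
    labels.foldl count_labels_step (n, b, v, t)
    = (n + labels.count "NORMAL", b + labels.count "PNEUMONIA_BACTERIA",
       v + labels.count "PNEUMONIA_VIRUS", t + labels.length) := by
  induction labels generalizing n b v t with
  | nil => simp
  | cons x xs ih =>
    rw [List.foldl_cons]
    by_cases h1 : x = "NORMAL"
    · subst h1
      rw [show count_labels_step (n, b, v, t) "NORMAL" = (n + 1, b, v, t + 1) by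
        simp [count_labels_step], ih]
      simp [Prod.ext_iff]
      all_goals omega
    · by_cases h2 : x = "PNEUMONIA_BACTERIA"
      · subst h2
        rw [show count_labels_step (n, b, v, t) "PNEUMONIA_BACTERIA" = (n, b + 1, v, t + 1) by
          simp [count_labels_step], ih]
        simp [Prod.ext_iff]
        all_goals omega
      · by_cases h3 : x = "PNEUMONIA_VIRUS"
        · subst h3
          rw [show count_labels_step (n, b, v, t) "PNEUMONIA_VIRUS" = (n, b, v + 1, t + 1) by
            simp [count_labels_step], ih]
          simp [Prod.ext_iff]
          all_goals omega
        · rw [show count_labels_step (n, b, v, t) x = (n, b, v, t + 1) by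
            simp [count_labels_step, h1, h2, h3], ih]
          simp [Prod.ext_iff, List.count_cons, h1, h2, h3]
          all_goals omega

-- ===== VERDICT (by name: the statement is the Claim_ definition above) =====
theorem count_labels_spec : Claim_equal_count_labels := by
  intro labels _
  show count_labels labels = count_labels_alt labels
  rw [count_labels, count_labels_fold, count_labels_alt]
  simp [PySem.List.count]
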